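-- pv_equiv track=rewrite | github.com/andresgenda/Carat | helpers.py | getOperationType
-- ===== SOURCE A (Python) =====
-- def getOperationType(currTok):
--     listaTipos = {
--         1 : ["ADD", "SUBSTR"],
--         2 : ["MULT", "DIVIS"],
--         3 : ["EQUAL"],
--         4 : ["MORE_THAN", "LESS_THAN", "IS_EQUAL", "NOT_EQUAL"],
--         5 : ["PRINT"],
--         6 : ["AND", "OR"]
--     }
--     for key in listaTipos:
--         if currTok in listaTipos[key]:
--             return key
--     return -1
-- ===== SOURCE B (Python) =====
-- _OP_GROUP = {
--     "ADD": 1, "SUBSTR": 1,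
--     "MULT": 2, "DIVIS": 2,
--     "EQUAL": 3,
--     "MORE_THAN": 4, "LESS_THAN": 4, "IS_EQUAL": 4, "NOT_EQUAL": 4,
--     "PRINT": 5,
--     "AND": 6, "OR": 6,
-- }
--
-- def getOperationType(currTok):
--     return _OP_GROUP.get(currTok, -1)
-- ===== Notes on version B (the rewrite author's own statement) =====
-- stated objective: idiomatic
-- what changed: Replaced the loop over group->token-list entries with list membership scans by a single prebuilt flat token->group dict and one hashed lookup with default -1.
import Mathlib
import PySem

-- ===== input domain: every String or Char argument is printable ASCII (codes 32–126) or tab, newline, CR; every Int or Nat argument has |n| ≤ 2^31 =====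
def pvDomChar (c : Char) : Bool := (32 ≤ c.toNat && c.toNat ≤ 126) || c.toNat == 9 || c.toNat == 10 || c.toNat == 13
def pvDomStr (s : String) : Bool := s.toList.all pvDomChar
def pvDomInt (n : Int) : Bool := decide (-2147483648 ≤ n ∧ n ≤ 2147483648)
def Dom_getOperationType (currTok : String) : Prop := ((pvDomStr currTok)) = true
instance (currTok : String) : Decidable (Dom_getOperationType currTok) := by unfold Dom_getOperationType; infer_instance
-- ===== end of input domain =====

-- B replaces A's loop over group lists (membership scan per group) with one flat
-- token->group reverse dict and a single lookup with default -1 (idiomatic).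

-- ===== PORT A =====
-- loop 'for key in listaTipos: if currTok in listaTipos[key]: return key' as
-- structural recursion over the dict's items in insertion order
def getOpLoopA : List (Int × List String) → String → Int
  | [], _ => -1
  | (key, toks) :: rest, t => if toks.contains t then key else getOpLoopA rest t

def getOperationType (currTok : String) : Int :=
  getOpLoopA
    [ (1, ["ADD", "SUBSTR"])
    , (2, ["MULT", "DIVIS"])
    , (3, ["EQUAL"])
    , (4, ["MORE_THAN", "LESS_THAN", "IS_EQUAL", "NOT_EQUAL"])
    , (5, ["PRINT"])
    , (6, ["AND", "OR"]) ] currTok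

-- ===== PORT B =====
def opGroupTable : PySem.Dict String Int :=
  PySem.Dict.ofList
    [ ("ADD", 1), ("SUBSTR", 1)
    , ("MULT", 2), ("DIVIS", 2)
    , ("EQUAL", 3)
    , ("MORE_THAN", 4), ("LESS_THAN", 4), ("IS_EQUAL", 4), ("NOT_EQUAL", 4)
    , ("PRINT", 5)
    , ("AND", 6), ("OR", 6) ]

def getOperationType_alt (currTok : String) : Int :=
  PySem.Dict.getD opGroupTable currTok (-1)

-- ===== PRECONDITION & SPEC =====
def Spec_getOperationType (currTok : String) (out : Int) : Prop := out = getOperationType_alt currTok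
instance (currTok : String) (out : Int) : Decidable (Spec_getOperationType currTok out) := by unfold Spec_getOperationType; infer_instance

-- ===== CLAIM (what is proved, stated in full; the proofs are below) =====
def Claim_equal_getOperationType : Prop := ∀ (currTok : String), Dom_getOperationType currTok → Spec_getOperationType currTok (getOperationType currTok)

-- ===== LEMMAS AND PROOFS =====

-- ===== VERDICT (by name: the statement is the Claim_ definition above) =====
theorem getOperationType_spec : Claim_equal_getOperationType := by
  intro t _
  unfold Spec_getOperationType getOperationType getOperationType_alt
  by_cases h1 : t = "ADD"; · subst h1; decide
  by_cases h2 : t = "SUBSTR"; · subst h2; decide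
  by_cases h3 : t = "MULT"; · subst h3; decide
  by_cases h4 : t = "DIVIS"; · subst h4; decide
  by_cases h5 : t = "EQUAL"; · subst h5; decide
  by_cases h6 : t = "MORE_THAN"; · subst h6; decide
  by_cases h7 : t = "LESS_THAN"; · subst h7; decide
  by_cases h8 : t = "IS_EQUAL"; · subst h8; decide
  by_cases h9 : t = "NOT_EQUAL"; · subst h9; decide
  by_cases h10 : t = "PRINT"; · subst h10; decide
  by_cases h11 : t = "AND"; · subst h11; decide
  by_cases h12 : t = "OR"; · subst h12; decide
  simp [getOpLoopA, opGroupTable, PySem.Dict.ofList, PySem.Dict.update,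
    PySem.Dict.getD_insert, PySem.Dict.getD_empty, List.foldl,
    h1, h2, h3, h4, h5, h6, h7, h8, h9, h10, h11, h12]
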